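-- pv_equiv track=rewrite | github.com/Tyzeppelin/Project-Euler | problem90/problem90.py | is_all_square
-- ===== SOURCE A (Python) =====
-- SQUARES = set([1, 4, 9, 16, 25, 36, 49, 64, 81])
--
-- def is_all_square(s1, s2):
--
--     sq = set()
--
--     for e1 in s1:
--         for e2 in s2:
--             if 10*e1+e2 in SQUARES:
--                 sq.add(10*e1+e2)
--             if 10*e2+e1 in SQUARES:
--                 sq.add(10*e2+e1)
--
--     return SQUARES == sq
-- ===== SOURCE B (Python) =====
-- SQUARES = set([1, 4, 9, 16, 25, 36, 49, 64, 81])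
--
-- def is_all_square(s1, s2):
--     t1, t2 = set(s1), set(s2)
--     return all(any(q - 10 * a in t2 for a in t1) or
--                any(q - 10 * b in t1 for b in t2)
--                for q in SQUARES)
-- ===== Notes on version B (the rewrite author's own statement) =====
-- stated objective: faster
-- what changed: Target-driven check: instead of pairing every element of s1 with every element of s2 to accumulate reachable squares, B asks for each of the 9 squares q whether some a in s1 has q-10a in s2 or some b in s2 has q-10b in s1, using set lookups.
import Mathlib
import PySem

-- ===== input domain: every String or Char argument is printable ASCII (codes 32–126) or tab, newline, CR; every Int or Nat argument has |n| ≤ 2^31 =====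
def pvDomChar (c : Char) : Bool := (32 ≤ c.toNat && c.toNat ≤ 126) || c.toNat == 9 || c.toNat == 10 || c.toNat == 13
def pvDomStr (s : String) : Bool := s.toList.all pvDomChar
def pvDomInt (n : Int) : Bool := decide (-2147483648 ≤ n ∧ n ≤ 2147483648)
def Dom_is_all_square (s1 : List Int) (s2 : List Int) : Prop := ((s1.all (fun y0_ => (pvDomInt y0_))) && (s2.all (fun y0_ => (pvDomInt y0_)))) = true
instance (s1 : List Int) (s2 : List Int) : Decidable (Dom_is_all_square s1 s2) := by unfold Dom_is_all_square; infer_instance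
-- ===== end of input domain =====

-- B changes A's source-driven O(n*m) pair accumulation into a target-driven O(n+m) check
-- per square with set lookups (objective: faster; equivalence of the RETURN value is proved).

-- ===== PORT A =====
-- SQUARES = set([1, 4, 9, 16, 25, 36, 49, 64, 81])
def SQUARES : PySem.Set Int := PySem.Set.ofList [1, 4, 9, 16, 25, 36, 49, 64, 81]

def is_all_square (s1 : List Int) (s2 : List Int) : Bool :=
  let sq : PySem.Set Int :=
    s1.foldl (fun sq e1 =>
      s2.foldl (fun sq e2 =>
        let sq := if PySem.Set.contains SQUARES (10*e1+e2) then PySem.Set.add sq (10*e1+e2) else sq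
        if PySem.Set.contains SQUARES (10*e2+e1) then PySem.Set.add sq (10*e2+e1) else sq) sq)
      PySem.Set.empty
  PySem.Set.equal SQUARES sq

-- ===== PORT B =====
def is_all_square_alt (s1 : List Int) (s2 : List Int) : Bool :=
  let t1 : PySem.Set Int := PySem.Set.ofList s1
  let t2 : PySem.Set Int := PySem.Set.ofList s2
  SQUARES.all (fun q =>
    t1.any (fun a => PySem.Set.contains t2 (q - 10*a)) ||
    t2.any (fun b => PySem.Set.contains t1 (q - 10*b)))

-- ===== PRECONDITION & SPEC =====
def Spec_is_all_square (s1 : List Int) (s2 : List Int) (out : Bool) : Prop := out = is_all_square_alt s1 s2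
instance (s1 : List Int) (s2 : List Int) (out : Bool) : Decidable (Spec_is_all_square s1 s2 out) := by unfold Spec_is_all_square; infer_instance

-- ===== CLAIM (what is proved, stated in full; the proofs are below) =====
def Claim_equal_is_all_square : Prop := ∀ (s1 : List Int) (s2 : List Int), Dom_is_all_square s1 s2 → Spec_is_all_square s1 s2 (is_all_square s1 s2)

-- ===== LEMMAS AND PROOFS =====

-- one iteration of the inner loop body
theorem mem_step (e1 e2 x : Int) (sq : PySem.Set Int) :
    (x ∈ (if PySem.Set.contains SQUARES (10*e2+e1)
          then PySem.Set.add (if PySem.Set.contains SQUARES (10*e1+e2) then PySem.Set.add sq (10*e1+e2) else sq) (10*e2+e1)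
          else if PySem.Set.contains SQUARES (10*e1+e2) then PySem.Set.add sq (10*e1+e2) else sq))
    ↔ x ∈ sq ∨ (x = 10*e1+e2 ∨ x = 10*e2+e1) ∧ x ∈ SQUARES := by
  have hc : ∀ y : Int, PySem.Set.contains SQUARES y = true ↔ y ∈ SQUARES :=
    fun y => PySem.Set.contains_iff _ _
  split_ifs with h1 h2 h2 <;>
    (try simp only [PySem.Set.mem_add]) <;>
    constructor
  · rintro ((h | rfl) | rfl)
    · exact Or.inl h
    · exact Or.inr ⟨Or.inl rfl, (hc _).1 h2⟩
    · exact Or.inr ⟨Or.inr rfl, (hc _).1 h1⟩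
  · rintro (h | ⟨rfl | rfl, hs⟩)
    · exact Or.inl (Or.inl h)
    · exact Or.inl (Or.inr rfl)
    · exact Or.inr rfl
  · rintro (h | rfl)
    · exact Or.inl h
    · exact Or.inr ⟨Or.inr rfl, (hc _).1 h1⟩
  · rintro (h | ⟨rfl | rfl, hs⟩)
    · exact Or.inl h
    · exact absurd ((hc _).2 hs) h2
    · exact Or.inr rfl
  · rintro (h | rfl)
    · exact Or.inl h
    · exact Or.inr ⟨Or.inl rfl, (hc _).1 h2⟩
  · rintro (h | ⟨rfl | rfl, hs⟩)
    · exact Or.inl h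
    · exact Or.inr rfl
    · exact absurd ((hc _).2 hs) h1
  · exact fun h => Or.inl h
  · rintro (h | ⟨rfl | rfl, hs⟩)
    · exact h
    · exact absurd ((hc _).2 hs) h2
    · exact absurd ((hc _).2 hs) h1

-- membership in the inner loop's accumulated set
theorem mem_inner (s2 : List Int) (e1 x : Int) (sq : PySem.Set Int) :
    x ∈ s2.foldl (fun sq e2 =>
        let sq := if PySem.Set.contains SQUARES (10*e1+e2) then PySem.Set.add sq (10*e1+e2) else sq
        if PySem.Set.contains SQUARES (10*e2+e1) then PySem.Set.add sq (10*e2+e1) else sq) sq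
      ↔ x ∈ sq ∨ ∃ e2 ∈ s2, (x = 10*e1+e2 ∨ x = 10*e2+e1) ∧ x ∈ SQUARES := by
  induction s2 generalizing sq with
  | nil => simp
  | cons h t ih =>
    simp only [List.foldl_cons]
    rw [ih, mem_step]
    constructor
    · rintro ((hx | ⟨hor, hs⟩) | ⟨e2, he2, hor, hs⟩)
      · exact Or.inl hx
      · exact Or.inr ⟨h, List.mem_cons_self, hor, hs⟩
      · exact Or.inr ⟨e2, List.mem_cons_of_mem _ he2, hor, hs⟩
    · rintro (hx | ⟨e2, he2, hor, hs⟩)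
      · exact Or.inl (Or.inl hx)
      · rcases List.mem_cons.1 he2 with rfl | he2
        · exact Or.inl (Or.inr ⟨hor, hs⟩)
        · exact Or.inr ⟨e2, he2, hor, hs⟩

-- membership in the whole double loop's accumulated set
theorem mem_outer (s1 s2 : List Int) (x : Int) (sq : PySem.Set Int) :
    x ∈ s1.foldl (fun sq e1 =>
      s2.foldl (fun sq e2 =>
        let sq := if PySem.Set.contains SQUARES (10*e1+e2) then PySem.Set.add sq (10*e1+e2) else sq
        if PySem.Set.contains SQUARES (10*e2+e1) then PySem.Set.add sq (10*e2+e1) else sq) sq) sq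
      ↔ x ∈ sq ∨ ∃ e1 ∈ s1, ∃ e2 ∈ s2, (x = 10*e1+e2 ∨ x = 10*e2+e1) ∧ x ∈ SQUARES := by
  induction s1 generalizing sq with
  | nil => simp
  | cons h t ih =>
    simp only [List.foldl_cons]
    rw [ih, mem_inner]
    constructor
    · rintro ((hx | ⟨e2, he2, hor, hs⟩) | ⟨e1, he1, e2, he2, hor, hs⟩)
      · exact Or.inl hx
      · exact Or.inr ⟨h, List.mem_cons_self, e2, he2, hor, hs⟩
      · exact Or.inr ⟨e1, List.mem_cons_of_mem _ he1, e2, he2, hor, hs⟩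
    · rintro (hx | ⟨e1, he1, e2, he2, hor, hs⟩)
      · exact Or.inl (Or.inl hx)
      · rcases List.mem_cons.1 he1 with rfl | he1
        · exact Or.inl (Or.inr ⟨e2, he2, hor, hs⟩)
        · exact Or.inr ⟨e1, he1, e2, he2, hor, hs⟩

theorem main_eq (s1 s2 : List Int) : is_all_square s1 s2 = is_all_square_alt s1 s2 := by
  rw [Bool.eq_iff_iff]
  simp only [is_all_square, is_all_square_alt]
  rw [PySem.Set.equal_iff, List.all_eq_true]
  constructor
  · intro h q hq
    have hq' : q ∈ SQUARES := hq
    rcases (h q).1 hq' with hmem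
    rw [mem_outer] at hmem
    rcases hmem with hmem | ⟨e1, he1, e2, he2, hor, _⟩
    · exact absurd hmem (List.not_mem_nil)
    · have m1 : e1 ∈ PySem.Set.ofList s1 := (PySem.Set.mem_ofList _ _).2 he1
      have m2 : e2 ∈ PySem.Set.ofList s2 := (PySem.Set.mem_ofList _ _).2 he2
      rcases hor with hq1 | hq2
      · rw [Bool.or_eq_true]
        refine Or.inl (List.any_eq_true.2 ⟨e1, m1, ?_⟩)
        have : q - 10*e1 = e2 := by omega
        rw [this]
        exact (PySem.Set.contains_iff _ _).2 m2
      · rw [Bool.or_eq_true]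
        refine Or.inr (List.any_eq_true.2 ⟨e2, m2, ?_⟩)
        have : q - 10*e2 = e1 := by omega
        rw [this]
        exact (PySem.Set.contains_iff _ _).2 m1
  · intro h q
    constructor
    · intro hq
      rw [mem_outer]
      rcases Bool.or_eq_true _ _ ▸ (h q hq) with h1 | h2
      · rcases List.any_eq_true.1 h1 with ⟨a, ha, hc⟩
        have ha' : a ∈ s1 := (PySem.Set.mem_ofList _ _).1 ha
        have hb' : q - 10*a ∈ s2 := (PySem.Set.mem_ofList _ _).1 ((PySem.Set.contains_iff _ _).1 hc)
        exact Or.inr ⟨a, ha', q - 10*a, hb', Or.inl (by omega), hq⟩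
      · rcases List.any_eq_true.1 h2 with ⟨b, hb, hc⟩
        have hb' : b ∈ s2 := (PySem.Set.mem_ofList _ _).1 hb
        have ha' : q - 10*b ∈ s1 := (PySem.Set.mem_ofList _ _).1 ((PySem.Set.contains_iff _ _).1 hc)
        exact Or.inr ⟨q - 10*b, ha', b, hb', Or.inr (by omega), hq⟩
    · intro hmem
      rw [mem_outer] at hmem
      rcases hmem with hmem | ⟨_, _, _, _, _, hs⟩
      · exact absurd hmem (List.not_mem_nil)
      · exact hs

-- ===== VERDICT (by name: the statement is the Claim_ definition above) =====
theorem is_all_square_spec : Claim_equal_is_all_square := by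
  intro s1 s2 _
  unfold Spec_is_all_square
  exact main_eq s1 s2
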